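-- pv_equiv track=rewrite | github.com/shilad/cartograph | cartograph/BorderFactoryTemp/_BorderProcessor.py | _getConsensusBorderIntersection
-- ===== SOURCE A (Python) =====
-- def _getConsensusBorderIntersection(indices1, indices2, len1, len2, reverse2):
--     """
--     Args:
--         indices1: *aligned* indices of points in points1 which are in intersection
--         indices2: *aligned* indices of points in points2 which are in intersection
--         len1: length of points1
--         len2: length of points2
--         reverse2: Whether or not indices2 is in reversed order
--     Returns:
--         list of lists of contiguous regions, whether the border is circle, and reverse2 (for convenience)
--     """
--     if len(indices1) != len(indices2):
--         raise ValueError("Lists of indices must be the same length.")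
--
--     # build list for each contiguous region
--     diff2 = -1 if reverse2 else 1
--     consensusLists = [[(indices1[0], indices2[0])]]
--     for i in range(1, len(indices1)):
--         prev = consensusLists[-1][-1]
--         current = (indices1[i], indices2[i])
--         if (prev[0] + 1) % len1 == current[0] and \
--                                 (prev[1] + diff2) % len2 == current[1]:
--             consensusLists[-1].append(current)
--         else:
--             consensusLists.append([current])
--
--     # check for circular and index 0 in the middle of an intersection
--     first = consensusLists[0][0]
--     last = consensusLists[-1][-1]
--     if (last[0] + 1) % len1 == first[0] and \
--                             (last[1] + diff2) % len2 == first[1]: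
--         if len(consensusLists) == 1:
--             # it's circular
--             return consensusLists, True, reverse2
--         else:
--             # 0 is in middle of intersection
--             consensusLists[0] = consensusLists[-1] + consensusLists[0]
--             consensusLists.pop()
--     return consensusLists, False, reverse2
-- ===== SOURCE B (Python) =====
-- def _getConsensusBorderIntersection(indices1, indices2, len1, len2, reverse2):
--     if len(indices1) != len(indices2):
--         raise ValueError("Lists of indices must be the same length.")
--     step = -1 if reverse2 else 1
--     pairs = list(zip(indices1, indices2))
--     n = len(pairs)
--     # pass 1: positions where a new contiguous region starts
--     breaks = [i for i in range(1, n)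
--               if (pairs[i - 1][0] + 1) % len1 != pairs[i][0]
--               or (pairs[i - 1][1] + step) % len2 != pairs[i][1]]
--     # pass 2: cut the pair list at those positions
--     groups = [pairs[s:e] for s, e in zip([0] + breaks, breaks + [n])]
--     first = groups[0][0]
--     last = groups[-1][-1]
--     wrap = (last[0] + 1) % len1 == first[0] and (last[1] + step) % len2 == first[1]
--     if wrap:
--         if len(groups) == 1:
--             return groups, True, reverse2
--         groups = [groups[-1] + groups[0]] + groups[1:-1]
--     return groups, False, reverse2
-- ===== Notes on version B (the rewrite author's own statement) =====
-- stated objective: alternative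
-- what changed: B replaces A's single stateful loop (appending into the last group of a mutated list-of-lists) by two passes: a first comprehension collects the region-start positions over range(1, n), and a second comprehension slices the zipped pair list at those positions; the circular merge is built by list slicing instead of A's in-place set/pop.
import Mathlib
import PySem

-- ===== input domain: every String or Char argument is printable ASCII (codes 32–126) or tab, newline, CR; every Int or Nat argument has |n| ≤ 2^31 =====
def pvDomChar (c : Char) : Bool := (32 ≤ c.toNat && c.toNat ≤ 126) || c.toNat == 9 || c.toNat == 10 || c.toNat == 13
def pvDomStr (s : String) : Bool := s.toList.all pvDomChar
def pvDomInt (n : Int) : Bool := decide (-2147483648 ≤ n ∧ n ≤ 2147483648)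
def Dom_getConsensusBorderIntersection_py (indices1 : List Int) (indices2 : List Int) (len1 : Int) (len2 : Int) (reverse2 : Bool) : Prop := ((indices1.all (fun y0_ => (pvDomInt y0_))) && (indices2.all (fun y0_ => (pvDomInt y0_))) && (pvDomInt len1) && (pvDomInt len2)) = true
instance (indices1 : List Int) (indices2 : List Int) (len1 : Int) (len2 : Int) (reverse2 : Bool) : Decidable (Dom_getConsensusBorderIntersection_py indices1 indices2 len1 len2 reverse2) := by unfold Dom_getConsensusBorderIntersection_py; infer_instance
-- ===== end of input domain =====

-- B is a two-pass re-decomposition of the same O(n) task: it first collects the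
-- region-start positions, then cuts the zipped pair list at them (return values
-- are proved equal; A's in-place list mutation is not reproduced).

-- ===== PORT A =====
-- helper: the body of A's "for i in range(1, len(indices1))" loop, transliterated
def pvAStep (indices1 : List Int) (indices2 : List Int) (len1 : Int) (len2 : Int)
    (diff2 : Int) (cl : List (List (Int × Int))) (i : Int) : List (List (Int × Int)) :=
  -- prev = consensusLists[-1][-1]
  let prev := PySem.List.pyGetD (PySem.List.pyGetD cl (-1) []) (-1) (0, 0)
  -- current = (indices1[i], indices2[i])
  let current := (PySem.List.pyGetD indices1 i 0, PySem.List.pyGetD indices2 i 0)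
  if PySem.Int.mod (prev.1 + 1) len1 = current.1 ∧ PySem.Int.mod (prev.2 + diff2) len2 = current.2 then
    cl.dropLast ++ [PySem.List.pyGetD cl (-1) [] ++ [current]]  -- consensusLists[-1].append(current)
  else
    cl ++ [[current]]                                           -- consensusLists.append([current])

def getConsensusBorderIntersection_py (indices1 : List Int) (indices2 : List Int) (len1 : Int) (len2 : Int) (reverse2 : Bool) : (List (List (Int × Int))) × Bool × Bool :=
  if indices1.length ≠ indices2.length then ([], false, reverse2)  -- ValueError: excluded by Pre_
  else
    let diff2 : Int := if reverse2 then -1 else 1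
    -- consensusLists = [[(indices1[0], indices2[0])]]  (IndexError on []: excluded by Pre_)
    let cl := (PySem.List.pyRange 1 (indices1.length : Int) 1).foldl
        (pvAStep indices1 indices2 len1 len2 diff2)
        [[(PySem.List.pyGetD indices1 0 0, PySem.List.pyGetD indices2 0 0)]]
    let first := PySem.List.pyGetD (PySem.List.pyGetD cl 0 []) 0 (0, 0)
    let last := PySem.List.pyGetD (PySem.List.pyGetD cl (-1) []) (-1) (0, 0)
    if PySem.Int.mod (last.1 + 1) len1 = first.1 ∧ PySem.Int.mod (last.2 + diff2) len2 = first.2 then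
      if cl.length = 1 then (cl, true, reverse2)
      else
        -- consensusLists[0] = consensusLists[-1] + consensusLists[0]; consensusLists.pop()
        ((cl.set 0 (PySem.List.pyGetD cl (-1) [] ++ PySem.List.pyGetD cl 0 [])).dropLast, false, reverse2)
    else (cl, false, reverse2)

-- ===== PORT B =====
-- helper: the comprehension condition of B's first pass ("a new region starts at i")
def pvBreakCond (pairs : List (Int × Int)) (len1 : Int) (len2 : Int) (step : Int) (i : Int) : Bool :=
  decide (PySem.Int.mod ((PySem.List.pyGetD pairs (i - 1) (0, 0)).1 + 1) len1 ≠ (PySem.List.pyGetD pairs i (0, 0)).1) ||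
  decide (PySem.Int.mod ((PySem.List.pyGetD pairs (i - 1) (0, 0)).2 + step) len2 ≠ (PySem.List.pyGetD pairs i (0, 0)).2)

def getConsensusBorderIntersection_py_alt (indices1 : List Int) (indices2 : List Int) (len1 : Int) (len2 : Int) (reverse2 : Bool) : (List (List (Int × Int))) × Bool × Bool :=
  if indices1.length ≠ indices2.length then ([], false, reverse2)  -- ValueError: excluded by Pre_
  else
    let step : Int := if reverse2 then -1 else 1
    let pairs := indices1.zip indices2             -- pairs = list(zip(indices1, indices2))
    let n : Int := pairs.length
    -- breaks = [i for i in range(1, n) if ...]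
    let breaks := (PySem.List.pyRange 1 n 1).filter (pvBreakCond pairs len1 len2 step)
    -- groups = [pairs[s:e] for s, e in zip([0] + breaks, breaks + [n])]
    let groups := ((0 :: breaks).zip (breaks ++ [n])).map
        (fun se => PySem.List.slice pairs (some se.1) (some se.2))
    let first := PySem.List.pyGetD (PySem.List.pyGetD groups 0 []) 0 (0, 0)   -- groups[0][0] (IndexError on []: excluded by Pre_)
    let last := PySem.List.pyGetD (PySem.List.pyGetD groups (-1) []) (-1) (0, 0)
    if PySem.Int.mod (last.1 + 1) len1 = first.1 ∧ PySem.Int.mod (last.2 + step) len2 = first.2 then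
      if groups.length = 1 then (groups, true, reverse2)
      else
        -- groups = [groups[-1] + groups[0]] + groups[1:-1]
        ((PySem.List.pyGetD groups (-1) [] ++ PySem.List.pyGetD groups 0 [])
            :: PySem.List.slice groups (some 1) (some (-1)), false, reverse2)
    else (groups, false, reverse2)

-- ===== PRECONDITION & SPEC =====
-- Pre_ excludes exactly the inputs where Python A raises: unequal-length index lists
-- (ValueError), empty lists (IndexError on indices1[0]), len1 = 0 (ZeroDivisionError: "% len1"
-- is always reached), and len2 = 0 when some "% len1" adjacency test (consecutive pairs, or the
-- final wrap-around test) succeeds, for then the short-circuiting "and" reaches "% len2".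
def Pre_getConsensusBorderIntersection_py (indices1 : List Int) (indices2 : List Int) (len1 : Int) (len2 : Int) (reverse2 : Bool) : Prop :=
  indices1.length = indices2.length ∧ indices1 ≠ [] ∧ len1 ≠ 0 ∧
    (len2 ≠ 0 ∨
      ((∀ q ∈ indices1.zip indices1.tail, PySem.Int.mod (q.1 + 1) len1 ≠ q.2) ∧
        PySem.Int.mod (indices1.getLastD 0 + 1) len1 ≠ indices1.headI))
instance (indices1 : List Int) (indices2 : List Int) (len1 : Int) (len2 : Int) (reverse2 : Bool) : Decidable (Pre_getConsensusBorderIntersection_py indices1 indices2 len1 len2 reverse2) := by unfold Pre_getConsensusBorderIntersection_py; infer_instance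

def pvWitness_getConsensusBorderIntersection_py : List Int × List Int × Int × Int × Bool :=
  ([0, 1, 5], [3, 4, 9], 8, 10, false)

def Spec_getConsensusBorderIntersection_py (indices1 : List Int) (indices2 : List Int) (len1 : Int) (len2 : Int) (reverse2 : Bool) (out : (List (List (Int × Int))) × Bool × Bool) : Prop := out = getConsensusBorderIntersection_py_alt indices1 indices2 len1 len2 reverse2
instance (indices1 : List Int) (indices2 : List Int) (len1 : Int) (len2 : Int) (reverse2 : Bool) (out : (List (List (Int × Int))) × Bool × Bool) : Decidable (Spec_getConsensusBorderIntersection_py indices1 indices2 len1 len2 reverse2 out) := by unfold Spec_getConsensusBorderIntersection_py; infer_instance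

-- ===== CLAIM =====
def Claim_equal_getConsensusBorderIntersection_py : Prop := ∀ (indices1 : List Int) (indices2 : List Int) (len1 : Int) (len2 : Int) (reverse2 : Bool), Dom_getConsensusBorderIntersection_py indices1 indices2 len1 len2 reverse2 → Pre_getConsensusBorderIntersection_py indices1 indices2 len1 len2 reverse2 → Spec_getConsensusBorderIntersection_py indices1 indices2 len1 len2 reverse2 (getConsensusBorderIntersection_py indices1 indices2 len1 len2 reverse2)

-- ===== LEMMAS AND PROOFS =====

-- canonical grouping of a nonempty pair list (head p, tail ps) into contiguous regions
def pvChunks (len1 : Int) (len2 : Int) (d : Int) : (Int × Int) → List (Int × Int) → List (List (Int × Int))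
  | p, [] => [[p]]
  | p, c :: rest =>
    let g := pvChunks len1 len2 d c rest
    if PySem.Int.mod (p.1 + 1) len1 = c.1 ∧ PySem.Int.mod (p.2 + d) len2 = c.2 then
      (p :: g.headI) :: g.tail
    else [p] :: g

lemma pvLastPy {α : Type} (xs : List α) (d : α) :
    PySem.List.pyGetD xs (-1) d = xs.getLastD d := by
  simp [PySem.List.pyGetD, PySem.List.pyGet?_neg_one, List.getLastD_eq_getLast?]

lemma pvChunks_ne_nil (L1 L2 d : Int) (p : Int × Int) (ps : List (Int × Int)) :
    pvChunks L1 L2 d p ps ≠ [] := by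
  cases ps with
  | nil => simp [pvChunks]
  | cons c rest => simp only [pvChunks]; split <;> simp

lemma pvChunks_headI_cons (L1 L2 d : Int) (p : Int × Int) (ps : List (Int × Int)) :
    (pvChunks L1 L2 d p ps).headI = p :: (pvChunks L1 L2 d p ps).headI.tail := by
  cases ps with
  | nil => simp [pvChunks]
  | cons c rest => simp only [pvChunks]; split <;> simp

lemma pvChunks_lastlast (L1 L2 d : Int) (p : Int × Int) (ps : List (Int × Int)) :
    ((pvChunks L1 L2 d p ps).getLastD []).getLastD (0, 0) = (p :: ps).getLastD (0, 0) := by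
  induction ps generalizing p with
  | nil => simp [pvChunks]
  | cons c rest ih =>
    obtain ⟨a, t, hg⟩ := List.exists_cons_of_ne_nil (pvChunks_ne_nil L1 L2 d c rest)
    have ha : a = c :: a.tail := by
      have h2 := pvChunks_headI_cons L1 L2 d c rest
      rw [hg] at h2; simpa using h2
    have hIH := ih c
    rw [hg] at hIH
    simp only [pvChunks, hg]
    split
    · cases t with
      | nil =>
        simp only [List.headI, List.tail_cons, List.getLastD_cons] at hIH ⊢
        rw [ha]; rw [ha] at hIH
        simpa using hIH
      | cons b t' =>
        simp only [List.headI, List.tail_cons, List.getLastD_cons] at hIH ⊢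
        simpa using hIH
    · simp only [List.getLastD_cons] at hIH ⊢
      cases t with
      | nil => rw [ha]; rw [ha] at hIH; simpa using hIH
      | cons b t' => simpa using hIH

lemma pvChunks_snoc (L1 L2 d : Int) (p y : Int × Int) (ps : List (Int × Int)) :
    pvChunks L1 L2 d p (ps ++ [y]) =
      if PySem.Int.mod (((p :: ps).getLastD (0, 0)).1 + 1) L1 = y.1 ∧
         PySem.Int.mod (((p :: ps).getLastD (0, 0)).2 + d) L2 = y.2 then
        (pvChunks L1 L2 d p ps).dropLast ++ [(pvChunks L1 L2 d p ps).getLastD [] ++ [y]]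
      else pvChunks L1 L2 d p ps ++ [[y]] := by
  induction ps generalizing p with
  | nil =>
    simp only [List.nil_append, pvChunks, List.getLastD_cons, List.getLastD_nil]
    split <;> simp
  | cons c rest ih =>
    obtain ⟨a, t, hg⟩ := List.exists_cons_of_ne_nil (pvChunks_ne_nil L1 L2 d c rest)
    have hcnd : (p :: c :: rest).getLastD (0, 0) = (c :: rest).getLastD (0, 0) := by
      simp
    simp only [List.cons_append, pvChunks, ih c, hcnd, hg]
    by_cases hL : PySem.Int.mod (((c :: rest).getLastD (0, 0)).1 + 1) L1 = y.1 ∧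
        PySem.Int.mod (((c :: rest).getLastD (0, 0)).2 + d) L2 = y.2
    · rw [if_pos hL, if_pos hL]
      by_cases hpc : PySem.Int.mod (p.1 + 1) L1 = c.1 ∧ PySem.Int.mod (p.2 + d) L2 = c.2
      · rw [if_pos hpc, if_pos hpc]
        cases t with
        | nil => simp
        | cons b t' => simp [List.dropLast_cons₂]
      · rw [if_neg hpc, if_neg hpc]
        simp
    · rw [if_neg hL, if_neg hL]
      by_cases hpc : PySem.Int.mod (p.1 + 1) L1 = c.1 ∧ PySem.Int.mod (p.2 + d) L2 = c.2
      · rw [if_pos hpc, if_pos hpc]; simp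
      · rw [if_neg hpc, if_neg hpc]; simp

-- A's loop computes pvChunks of the first k pairs
lemma pvA_fold (l1 l2 : List Int) (L1 L2 d : Int) (hlen : l1.length = l2.length)
    (k : Nat) (hk1 : 1 ≤ k) :
    k ≤ l1.length →
    (PySem.List.pyRange 1 (k : Int) 1).foldl (pvAStep l1 l2 L1 L2 d)
        [[(l1.zip l2).headI]]
      = pvChunks L1 L2 d (l1.zip l2).headI (((l1.zip l2).tail).take (k - 1)) := by
  induction k, hk1 using Nat.le_induction with
  | base =>
    intro hk
    rw [show ((1 : Nat) : Int) = 1 by norm_num, PySem.List.pyRange_one_eq_nil (by norm_num)]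
    simp [pvChunks]
  | succ k hk1' ih =>
    intro hk
    have hzlen : (l1.zip l2).length = l1.length := by rw [List.length_zip]; omega
    have hk' : k < l1.length := by omega
    have hk2 : k < l2.length := by omega
    have hkz : k < (l1.zip l2).length := by omega
    have htlen : k - 1 < (l1.zip l2).tail.length := by
      rw [List.length_tail]; omega
    rw [show ((k + 1 : Nat) : Int) = (k : Int) + 1 by push_cast; ring,
        PySem.List.pyRange_one_succ_right (by exact_mod_cast hk1'),
        List.foldl_append, ih (by omega)]
    simp only [List.foldl_cons, List.foldl_nil]
    have htake : ((l1.zip l2).tail).take (k + 1 - 1)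
        = ((l1.zip l2).tail).take (k - 1) ++ [(l1.zip l2)[k]] := by
      have hsub : k + 1 - 1 = (k - 1) + 1 := by omega
      rw [hsub, List.take_add_one]
      have : (l1.zip l2).tail[k - 1]? = some ((l1.zip l2).tail[k - 1]) :=
        List.getElem?_eq_getElem htlen
      rw [this]
      have : (l1.zip l2).tail[k - 1] = (l1.zip l2)[k] := by
        rw [List.getElem_tail]
        congr 1
        omega
      rw [this]
      rfl
    rw [htake, pvChunks_snoc]
    simp only [pvAStep, pvLastPy, pvChunks_lastlast]
    have hget1 : PySem.List.pyGetD l1 (k : Int) 0 = l1[k] := by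
      rw [PySem.List.pyGetD_natCast]
      exact List.getD_eq_getElem l1 0 hk'
    have hget2 : PySem.List.pyGetD l2 (k : Int) 0 = l2[k] := by
      rw [PySem.List.pyGetD_natCast]
      exact List.getD_eq_getElem l2 0 hk2
    have hgetz : (l1.zip l2)[k] = (l1[k], l2[k]) := List.getElem_zip (h := hkz)
    rw [hget1, hget2, hgetz]

-- ---- B-side machinery: cutting a list at break positions ----

-- pyGetD of a snoc at an in-range nonnegative index
lemma pvGetD_snoc_lt {α : Type} [Inhabited α] (xs : List α) (y d : α) (i : Int)
    (h0 : 0 ≤ i) (h : i < xs.length) :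
    PySem.List.pyGetD (xs ++ [y]) i d = PySem.List.pyGetD xs i d := by
  obtain ⟨k, rfl⟩ := Int.eq_ofNat_of_zero_le h0
  rw [PySem.List.pyGetD_natCast, PySem.List.pyGetD_natCast]
  have hk : k < xs.length := by exact_mod_cast h
  simp [List.getD, List.getElem?_append_left hk]

lemma pvGetD_snoc_self {α : Type} [Inhabited α] (xs : List α) (y d : α) :
    PySem.List.pyGetD (xs ++ [y]) (xs.length : Int) d = y := by
  rw [PySem.List.pyGetD_natCast]
  simp [List.getD]

lemma pvGetD_last {α : Type} [Inhabited α] (xs : List α) (d : α) (h : xs ≠ []) :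
    PySem.List.pyGetD xs ((xs.length : Int) - 1) d = xs.getLastD d := by
  have hlen : 1 ≤ xs.length := List.length_pos_of_ne_nil h
  have hc : ((xs.length : Int) - 1) = ((xs.length - 1 : Nat) : Int) := by omega
  rw [hc, PySem.List.pyGetD_natCast]
  rw [List.getLastD_eq_getLast?, List.getLast?_eq_getElem?]
  simp [List.getD]

-- a slice with both ends below the length ignores an appended element
lemma pvSlice_snoc_lt (xs : List (Int × Int)) (y : Int × Int) (s e : Int)
    (hs : 0 ≤ s) (he0 : 0 ≤ e) (he : e ≤ (xs.length : Int)) :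
    PySem.List.slice (xs ++ [y]) (some s) (some e) = PySem.List.slice xs (some s) (some e) := by
  rw [PySem.List.slice_toNat _ hs he0, PySem.List.slice_toNat _ hs he0]
  have heN : e.toNat ≤ xs.length := by omega
  by_cases hse : s.toNat ≤ e.toNat
  · have hd : (xs ++ [y]).drop s.toNat = xs.drop s.toNat ++ [y] := by
      rw [List.drop_append_of_le_length (by omega)]
    rw [hd, List.take_append_of_le_length (by rw [List.length_drop]; omega)]
  · have : e.toNat - s.toNat = 0 := by omega
    simp [this]

-- slicing the snoc up to the new end extends the final slice by the new element
lemma pvSlice_snoc_end (xs : List (Int × Int)) (y : Int × Int) (s : Int)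
    (hs : 0 ≤ s) (hsl : s ≤ (xs.length : Int)) :
    PySem.List.slice (xs ++ [y]) (some s) (some ((xs.length : Int) + 1)) =
      PySem.List.slice xs (some s) (some (xs.length : Int)) ++ [y] := by
  rw [PySem.List.slice_toNat _ hs (by positivity), PySem.List.slice_toNat _ hs (by positivity)]
  have h1 : ((xs.length : Int) + 1).toNat = xs.length + 1 := by omega
  have h2 : ((xs.length : Int)).toNat = xs.length := by omega
  rw [h1, h2]
  have hd : (xs ++ [y]).drop s.toNat = xs.drop s.toNat ++ [y] := by
    rw [List.drop_append_of_le_length (by omega)]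
  rw [hd]
  rw [List.take_of_length_le (by simp only [List.length_append, List.length_drop,
        List.length_cons, List.length_nil]; omega),
      List.take_of_length_le (by rw [List.length_drop])]

-- B's "cut at breaks" comprehension, recursively
def pvCut (xs : List (Int × Int)) : Int → List Int → Int → List (List (Int × Int))
  | s, [], e => [PySem.List.slice xs (some s) (some e)]
  | s, b :: bs, e => PySem.List.slice xs (some s) (some b) :: pvCut xs b bs e

lemma pvCut_eq_zipmap (xs : List (Int × Int)) (s : Int) (bs : List Int) (e : Int) :
    ((s :: bs).zip (bs ++ [e])).map (fun se => PySem.List.slice xs (some se.1) (some se.2))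
      = pvCut xs s bs e := by
  induction bs generalizing s with
  | nil => simp [pvCut]
  | cons b bs' ih => simp [pvCut, ih b]

lemma pvCut_ne_nil (xs : List (Int × Int)) (s : Int) (bs : List Int) (e : Int) :
    pvCut xs s bs e ≠ [] := by
  cases bs <;> simp [pvCut]

-- non-adjacent snoc: a new break at position n appends a fresh singleton group
lemma pvCut_snoc_break (xs : List (Int × Int)) (y : Int × Int) (bs : List Int) (s : Int)
    (hs : 0 ≤ s ∧ s ≤ (xs.length : Int))
    (hb : ∀ b ∈ bs, 0 ≤ b ∧ b ≤ (xs.length : Int)) :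
    pvCut (xs ++ [y]) s (bs ++ [(xs.length : Int)]) ((xs.length : Int) + 1)
      = pvCut xs s bs (xs.length : Int) ++ [[y]] := by
  induction bs generalizing s with
  | nil =>
    simp only [List.nil_append, pvCut]
    rw [pvSlice_snoc_lt xs y s _ hs.1 (by positivity) le_rfl]
    have hlast : PySem.List.slice (xs ++ [y]) (some (xs.length : Int)) (some ((xs.length : Int) + 1)) = [y] := by
      rw [pvSlice_snoc_end xs y _ (by positivity) le_rfl]
      rw [PySem.List.slice_toNat _ (by positivity) (by positivity)]
      simp
    rw [hlast]
    simp
  | cons b bs' ih =>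
    have hbb := hb b (by simp)
    simp only [List.cons_append, pvCut]
    rw [pvSlice_snoc_lt xs y s b hs.1 hbb.1 hbb.2,
        ih b hbb (fun c hc => hb c (by simp [hc]))]

-- adjacent snoc: no new break, the last group is extended by the new element
lemma pvCut_snoc_merge (xs : List (Int × Int)) (y : Int × Int) (bs : List Int) (s : Int)
    (hs : 0 ≤ s ∧ s ≤ (xs.length : Int))
    (hb : ∀ b ∈ bs, 0 ≤ b ∧ b ≤ (xs.length : Int)) :
    pvCut (xs ++ [y]) s bs ((xs.length : Int) + 1)
      = (pvCut xs s bs (xs.length : Int)).dropLast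
          ++ [(pvCut xs s bs (xs.length : Int)).getLastD [] ++ [y]] := by
  induction bs generalizing s with
  | nil =>
    simp only [pvCut, List.dropLast_singleton, List.nil_append, List.getLastD_cons,
      List.getLastD_nil]
    rw [pvSlice_snoc_end xs y s hs.1 hs.2]
  | cons b bs' ih =>
    have hbb := hb b (by simp)
    simp only [pvCut]
    rw [pvSlice_snoc_lt xs y s b hs.1 hbb.1 hbb.2,
        ih b hbb (fun c hc => hb c (by simp [hc]))]
    obtain ⟨g, t, hg⟩ := List.exists_cons_of_ne_nil (pvCut_ne_nil xs b bs' (xs.length : Int))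
    rw [hg]
    simp

-- the break positions of a snoc list
lemma pvBreaks_snoc (L1 L2 d : Int) (xs : List (Int × Int)) (y : Int × Int) (h : xs ≠ []) :
    (PySem.List.pyRange 1 (((xs ++ [y]).length : Nat) : Int) 1).filter (pvBreakCond (xs ++ [y]) L1 L2 d)
      = ((PySem.List.pyRange 1 ((xs.length : Nat) : Int) 1).filter (pvBreakCond xs L1 L2 d))
        ++ (if PySem.Int.mod ((xs.getLastD (0, 0)).1 + 1) L1 = y.1 ∧
               PySem.Int.mod ((xs.getLastD (0, 0)).2 + d) L2 = y.2
            then [] else [(xs.length : Int)]) := by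
  have hlen : 1 ≤ xs.length := List.length_pos_of_ne_nil h
  have hcast : (((xs ++ [y]).length : Nat) : Int) = (xs.length : Int) + 1 := by
    simp
  rw [hcast, PySem.List.pyRange_one_succ_right (by exact_mod_cast hlen), List.filter_append]
  congr 1
  · apply List.filter_congr
    intro i hi
    rw [PySem.List.mem_pyRange_one] at hi
    unfold pvBreakCond
    rw [pvGetD_snoc_lt xs y _ i (by omega) (by omega),
        pvGetD_snoc_lt xs y _ (i - 1) (by omega) (by omega)]
  · have hprev : PySem.List.pyGetD (xs ++ [y]) ((xs.length : Int) - 1) (0, 0) = xs.getLastD (0, 0) := by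
      rw [pvGetD_snoc_lt xs y _ _ (by omega) (by omega), pvGetD_last xs _ h]
    simp only [List.filter_singleton, pvBreakCond, hprev, pvGetD_snoc_self]
    by_cases hadj : PySem.Int.mod ((xs.getLastD (0, 0)).1 + 1) L1 = y.1 ∧
        PySem.Int.mod ((xs.getLastD (0, 0)).2 + d) L2 = y.2
    · rw [if_pos hadj]
      rw [List.getLastD_eq_getLast?] at hadj
      simp [hadj.1, hadj.2]
    · rw [if_neg hadj]
      rw [List.getLastD_eq_getLast?] at hadj
      rw [Decidable.not_and_iff_not_or_not] at hadj
      rcases hadj with hadj | hadj <;> simp [hadj]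

-- main B lemma: the two-pass cut equals the canonical grouping
lemma pvB_groups (L1 L2 d : Int) (ys : List (Int × Int)) (h : ys ≠ []) :
    pvCut ys 0 ((PySem.List.pyRange 1 ((ys.length : Nat) : Int) 1).filter (pvBreakCond ys L1 L2 d))
        ((ys.length : Nat) : Int)
      = pvChunks L1 L2 d ys.headI ys.tail := by
  induction ys using List.reverseRecOn with
  | nil => exact absurd rfl h
  | append_singleton zs y ih =>
    cases hz : zs with
    | nil =>
      subst hz
      simp only [List.nil_append, List.length_cons, List.length_nil]
      rw [show (((0 + 1 : Nat)) : Int) = 1 by norm_num, PySem.List.pyRange_one_eq_nil le_rfl]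
      simp only [List.filter_nil, pvCut, List.headI_cons, List.tail_cons, pvChunks]
      rw [PySem.List.slice_toNat _ le_rfl (by norm_num)]
      simp
    | cons z zt =>
      rw [← hz]
      have hzne : zs ≠ [] := by rw [hz]; simp
      have hbmem : ∀ b ∈ (PySem.List.pyRange 1 ((zs.length : Nat) : Int) 1).filter (pvBreakCond zs L1 L2 d),
          0 ≤ b ∧ b ≤ (zs.length : Int) := by
        intro b hbm
        have := List.mem_of_mem_filter hbm
        rw [PySem.List.mem_pyRange_one] at this
        omega
      rw [pvBreaks_snoc L1 L2 d zs y hzne]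
      have hheadI : (zs ++ [y]).headI = zs.headI := by rw [hz]; simp
      have htail : (zs ++ [y]).tail = zs.tail ++ [y] := by rw [hz]; simp
      have hzhead : zs = zs.headI :: zs.tail := by rw [hz]; simp
      have hlastD : (zs.headI :: zs.tail).getLastD (0, 0) = zs.getLastD (0, 0) := by
        rw [← hzhead]
      have hcast2 : (((zs ++ [y]).length : Nat) : Int) = (zs.length : Int) + 1 := by simp
      rw [hheadI, htail, pvChunks_snoc, hlastD, hcast2]
      by_cases hadj : PySem.Int.mod ((zs.getLastD (0, 0)).1 + 1) L1 = y.1 ∧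
          PySem.Int.mod ((zs.getLastD (0, 0)).2 + d) L2 = y.2
      · rw [if_pos hadj, if_pos hadj, List.append_nil]
        rw [pvCut_snoc_merge zs y _ 0 ⟨le_rfl, by positivity⟩ hbmem, ih hzne]
      · rw [if_neg hadj, if_neg hadj]
        rw [pvCut_snoc_break zs y _ 0 ⟨le_rfl, by positivity⟩ hbmem, ih hzne]

-- A's set/pop merge equals B's cons/slice merge on a list of length ≥ 2
lemma pvSlice_one_neg_one {α : Type} (xs : List α) (h : 1 ≤ xs.length) :
    PySem.List.slice xs (some 1) (some (-1)) = xs.tail.dropLast := by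
  have hmin : min 1 xs.length = 1 := Nat.min_eq_left h
  simp [PySem.List.slice, hmin, List.drop_one, List.dropLast_eq_take, List.length_tail]

lemma pvMergeEq (G : List (List (Int × Int))) (x : List (Int × Int)) (h2 : 2 ≤ G.length) :
    (G.set 0 x).dropLast = x :: PySem.List.slice G (some 1) (some (-1)) := by
  rw [pvSlice_one_neg_one G (by omega)]
  cases G with
  | nil => simp at h2
  | cons g t =>
    cases t with
    | nil => simp at h2
    | cons b t' => simp [List.dropLast_cons₂]

-- ===== VERDICT (by name: the statement is the Claim_ definition above) =====
theorem getConsensusBorderIntersection_py_spec : Claim_equal_getConsensusBorderIntersection_py := by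
  intro l1 l2 L1 L2 r hDom hPre
  obtain ⟨hlen, hne, -, -⟩ := hPre
  unfold Spec_getConsensusBorderIntersection_py
  obtain ⟨a1, t1, rfl⟩ := List.exists_cons_of_ne_nil hne
  have hl2ne : l2 ≠ [] := by
    intro hh; rw [hh] at hlen; simp at hlen
  obtain ⟨a2, t2, rfl⟩ := List.exists_cons_of_ne_nil hl2ne
  have hlneg : ¬ (a1 :: t1).length ≠ (a2 :: t2).length := fun hh => hh hlen
  unfold getConsensusBorderIntersection_py getConsensusBorderIntersection_py_alt
  rw [if_neg hlneg, if_neg hlneg]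
  simp only [List.zip_cons_cons, PySem.List.pyGetD_zero_cons, pvLastPy]
  -- A's fold
  have hA := pvA_fold (a1 :: t1) (a2 :: t2) L1 L2 (if r then -1 else 1) hlen
      (a1 :: t1).length (by simp) (le_refl _)
  simp only [List.zip_cons_cons, List.headI_cons, List.tail_cons] at hA
  have htk : (t1.zip t2).take ((a1 :: t1).length - 1) = t1.zip t2 := by
    apply List.take_of_length_le
    rw [List.length_zip, List.length_cons]
    omega
  rw [htk] at hA
  rw [hA]
  -- B's two passes
  have hB := pvB_groups L1 L2 (if r then -1 else 1) ((a1, a2) :: t1.zip t2) (by simp)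
  simp only [List.headI_cons, List.tail_cons] at hB
  rw [pvCut_eq_zipmap, hB]
  set G := pvChunks L1 L2 (if r then -1 else 1) (a1, a2) (t1.zip t2) with hG
  -- both sides now compute from the same G; only the merge branch differs syntactically
  by_cases hone : G.length = 1
  · simp [hone]
  · have hGne : G ≠ [] := pvChunks_ne_nil L1 L2 _ (a1, a2) (t1.zip t2)
    have h2 : 2 ≤ G.length := by
      have := List.length_pos_of_ne_nil hGne
      omega
    rw [if_neg hone, if_neg hone, pvMergeEq G _ h2]
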